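-- pv_equiv track=rewrite | github.com/hroest/wikispell | wikispell/textrange_parser.py | split_with_ignores
-- ===== SOURCE A (Python) =====
-- def find_next_unignored( text, start, pattern, ignores=[]):
--     """Find the next occurence of pattern starting from start, excluding all
--     positions given in ignores. If none is found, it returns -1."""
--
--     next_match = text.find( pattern, start )
--     while next_match != -1:
--         if next_match not in ignores: return next_match
--         next_match = text.find( pattern, start + 1)
--         start = next_match
--     return -1
--
-- def split_with_ignores(current_text, separator, this_ignores):
--     """Split the text at the separator, ignoring certain positions.
--
--     Basically a "current_text.split( separator )" method with the only
--     difference that it will not split at any position that is contained in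
--     the this_ignores array """
--     loc = 0
--     elements = []
--     while True:
--       splitat = find_next_unignored(current_text, loc, separator, this_ignores )
--       if splitat < 0: break
--       elements.append(current_text[loc:splitat])
--       loc = splitat + 1
--     elements.append(current_text[loc:])
--     return elements
-- ===== SOURCE B (Python) =====
-- def split_with_ignores(current_text, separator, this_ignores):
--     """Split the text at the separator, ignoring certain positions.
--
--     Two-phase: first collect every occurrence index of the separator
--     (stepping one position at a time), then slice the text at the
--     non-ignored indices."""
--     positions = []
--     i = current_text.find(separator)
--     while i != -1:
--         positions.append(i)
--         i = current_text.find(separator, i + 1)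
--     parts = []
--     prev = 0
--     for p in positions:
--         if p not in this_ignores:
--             parts.append(current_text[prev:p])
--             prev = p + 1
--     parts.append(current_text[prev:])
--     return parts
-- ===== Notes on version B (the rewrite author's own statement) =====
-- stated objective: alternative
-- what changed: A interleaves searching and cutting through a stateful find_next_unignored helper that re-scans from the current cut position; B is a two-phase algorithm that first collects every separator occurrence index (stepping the search by one position) and then builds the segments in a single pass over that index list, skipping ignored indices.
import Mathlib
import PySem

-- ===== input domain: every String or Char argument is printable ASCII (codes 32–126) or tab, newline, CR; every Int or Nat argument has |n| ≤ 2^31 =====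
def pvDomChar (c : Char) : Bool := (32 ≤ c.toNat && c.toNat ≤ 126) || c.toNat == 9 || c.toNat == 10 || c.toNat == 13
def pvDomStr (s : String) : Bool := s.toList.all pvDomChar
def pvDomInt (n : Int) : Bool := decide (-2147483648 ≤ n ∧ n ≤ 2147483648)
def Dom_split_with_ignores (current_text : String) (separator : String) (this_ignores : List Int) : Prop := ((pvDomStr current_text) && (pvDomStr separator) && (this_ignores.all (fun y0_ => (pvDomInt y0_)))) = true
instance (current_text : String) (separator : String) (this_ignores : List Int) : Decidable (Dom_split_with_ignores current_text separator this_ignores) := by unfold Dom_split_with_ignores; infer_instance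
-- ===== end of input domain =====

-- B replaces A's interleaved search-and-cut (via the stateful helper find_next_unignored) by a
-- two-phase algorithm: collect all separator occurrence indices first, then slice in one pass
-- over that list, skipping ignored indices (objective: alternative decomposition, same cost).

-- ===== PORT A =====
-- the while-loop of find_next_unignored; state (start, next_match); fuel only makes it total
def fnuLoop (text pattern : String) (ignores : List Int) (start next_match : Int) : Nat → Int
  | 0 => -1
  | fuel+1 =>
    if next_match = -1 then -1
    else if next_match ∉ ignores then next_match
    else
      fnuLoop text pattern ignores (PySem.Str.findFrom text pattern (start+1))
        (PySem.Str.findFrom text pattern (start+1)) fuel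

def find_next_unignored (text : String) (start : Int) (pattern : String) (ignores : List Int) : Int :=
  fnuLoop text pattern ignores start (PySem.Str.findFrom text pattern start) (text.toList.length + 2)

-- the while True loop of split_with_ignores; fuel only makes it total
def aLoop (text sep : String) (ign : List Int) (loc : Int) (elements : List String) : Nat → List String
  | 0 => elements ++ [PySem.Str.slice text (some loc) none]
  | fuel+1 =>
    let splitat := find_next_unignored text loc sep ign
    if splitat < 0 then elements ++ [PySem.Str.slice text (some loc) none]
    else aLoop text sep ign (splitat + 1)
      (elements ++ [PySem.Str.slice text (some loc) (some splitat)]) fuel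

def split_with_ignores (current_text : String) (separator : String) (this_ignores : List Int) : List String :=
  aLoop current_text separator this_ignores 0 [] (current_text.toList.length + 2)

-- ===== PORT B =====
-- phase 1 of Source B: collect every occurrence index, stepping the search by one position
def posLoop (text sep : String) (i : Int) : Nat → List Int
  | 0 => []
  | fuel+1 => if i = -1 then [] else i :: posLoop text sep (PySem.Str.findFrom text sep (i+1)) fuel

-- the body of Source B's for-loop over positions; state (prev, parts)
def bStep (text : String) (ign : List Int) (st : Int × List String) (p : Int) : Int × List String :=
  if p ∉ ign then (p + 1, st.2 ++ [PySem.Str.slice text (some st.1) (some p)]) else st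

def split_with_ignores_alt (current_text : String) (separator : String) (this_ignores : List Int) : List String :=
  let positions := posLoop current_text separator (PySem.Str.find current_text separator) (current_text.toList.length + 2)
  let st := positions.foldl (bStep current_text this_ignores) (0, [])
  st.2 ++ [PySem.Str.slice current_text (some st.1) none]

-- ===== PRECONDITION & SPEC =====
def Spec_split_with_ignores (current_text : String) (separator : String) (this_ignores : List Int) (out : List String) : Prop := out = split_with_ignores_alt current_text separator this_ignores
instance (current_text : String) (separator : String) (this_ignores : List Int) (out : List String) : Decidable (Spec_split_with_ignores current_text separator this_ignores out) := by unfold Spec_split_with_ignores; infer_instance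

-- ===== CLAIM (what is proved, stated in full; the proofs are below) =====
def Claim_equal_split_with_ignores : Prop := ∀ (current_text : String) (separator : String) (this_ignores : List Int), Dom_split_with_ignores current_text separator this_ignores → Spec_split_with_ignores current_text separator this_ignores (split_with_ignores current_text separator this_ignores)

-- ===== LEMMAS AND PROOFS =====

-- abbreviations for the proof: text length, the find primitive, occurrence predicate
def swN (text : String) : Nat := text.toList.length
def swFF (text sep : String) (k : Int) : Int := PySem.Str.findFrom text sep k
def swOcc (text sep : String) (j : Nat) : Prop := sep.toList <+: text.toList.drop j
-- loop invariant: the running index is -1 or an in-range occurrence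
def swInv (text sep : String) (i : Int) : Prop :=
  i = -1 ∨ (0 ≤ i ∧ i ≤ (swN text : Int) ∧ swOcc text sep i.toNat)
-- termination measure for the index streams
def swMu (text : String) (i : Int) : Nat := if i = -1 then 0 else swN text + 1 - i.toNat
-- canonical form of A's inner loop (first non-ignored index in the stream)
def swFk (text sep : String) (ign : List Int) : Nat → Int → Int
  | 0, _ => -1
  | fuel+1, i =>
    if i = -1 then -1
    else if i ∉ ign then i
    else swFk text sep ign fuel (swFF text sep (i+1))
-- canonical form of B's occurrence stream
def swChain (text sep : String) : Nat → Int → List Int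
  | 0, _ => []
  | fuel+1, i => if i = -1 then [] else i :: swChain text sep fuel (swFF text sep (i+1))

theorem swFF_past (text sep : String) (k : Int) (hk : (swN text : Int) < k) :
    swFF text sep k = -1 := by
  have h0 : ¬ k < 0 := by have : (0:Int) ≤ (swN text : Int) := Int.natCast_nonneg _; omega
  simp only [swFF, PySem.Str.findFrom, PySem.Chars.findFrom, swN] at *
  simp only [h0, if_false, if_pos hk]

theorem sw_infix_drop_iff (s sub : List Char) (k : Nat) :
    sub <:+: s.drop k ↔ ∃ j : Nat, k ≤ j ∧ sub <+: s.drop j := by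
  constructor
  · intro h
    have h1 : PySem.Chars.isIn sub (s.drop k) = true := (PySem.Chars.isIn_iff_infix _ _).2 h
    obtain ⟨m, hm⟩ := (PySem.Chars.exists_prefix_drop_iff_isIn sub (s.drop k)).2 h1
    exact ⟨k + m, by omega, by rwa [List.drop_drop] at hm⟩
  · rintro ⟨j, hkj, hj⟩
    have h2 : sub <+: (s.drop k).drop (j - k) := by
      rw [List.drop_drop, show k + (j - k) = j from by omega]; exact hj
    have h1 : PySem.Chars.isIn sub (s.drop k) = true :=
      (PySem.Chars.exists_prefix_drop_iff_isIn sub (s.drop k)).1 ⟨j - k, h2⟩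
    exact (PySem.Chars.isIn_iff_infix _ _).1 h1

theorem swFF_neg_iff (text sep : String) (k : Nat) (hk : k ≤ swN text) :
    swFF text sep (k : Int) = -1 ↔ ∀ j : Nat, k ≤ j → ¬ swOcc text sep j := by
  have := PySem.Chars.findFrom_natCast_eq_neg_one_iff text.toList sep.toList k hk
  simp only [swFF, PySem.Str.findFrom_eq]
  rw [this, sw_infix_drop_iff]
  simp [swOcc, not_exists, not_and]

theorem swFF_spec (text sep : String) (k : Nat) (hk : k ≤ swN text)
    (h : swFF text sep (k : Int) ≠ -1) :
    (k : Int) ≤ swFF text sep k ∧ swFF text sep k ≤ (swN text : Int) ∧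
      swOcc text sep (swFF text sep k).toNat ∧
      ∀ j : Nat, k ≤ j → j < (swFF text sep k).toNat → ¬ swOcc text sep j := by
  have h' : PySem.Chars.findFrom text.toList sep.toList (k : Int) none ≠ -1 := by
    simpa [swFF] using h
  obtain ⟨h1, h2, h3⟩ := PySem.Chars.findFrom_natCast_spec text.toList sep.toList k hk h'
  have hle : swFF text sep k ≤ (swN text : Int) := by
    have heq := PySem.Chars.findFrom_natCast text.toList sep.toList k hk
    have hfl := PySem.Chars.find_le_length (text.toList.drop k) sep.toList
    simp only [swFF, PySem.Str.findFrom_eq, heq]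
    by_cases hneg : PySem.Chars.find (text.toList.drop k) sep.toList = -1
    · simp [hneg, swN]
    · simp only [hneg, if_false]
      have : (text.toList.drop k).length = swN text - k := by simp [swN]
      rw [this] at hfl
      have : ((swN text - k : Nat) : Int) ≤ (swN text : Int) - k := by omega
      omega
  refine ⟨by simpa [swFF] using h1, hle, by simpa [swFF, swOcc] using h2, ?_⟩
  intro j hj1 hj2
  have := h3 j hj1 (by simpa [swFF] using hj2)
  simpa [swOcc] using this

theorem swFF_ge (text sep : String) (k : Int) (h0 : 0 ≤ k) :
    swFF text sep k = -1 ∨ k ≤ swFF text sep k := by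
  by_cases hk : k ≤ (swN text : Int)
  · by_cases h : swFF text sep k = -1
    · exact Or.inl h
    · right
      have hk' : k = ((k.toNat : Nat) : Int) := by omega
      have := (swFF_spec text sep k.toNat (by omega) (by rwa [← hk'])).1
      rw [hk']; rwa [← hk'] at this ⊢
  · exact Or.inl (swFF_past text sep k (by omega))

theorem swInv_ff (text sep : String) (k : Int) (h0 : 0 ≤ k) :
    swInv text sep (swFF text sep k) := by
  by_cases hk : k ≤ (swN text : Int)
  · by_cases h : swFF text sep k = -1
    · exact Or.inl h
    · have hk' : k = ((k.toNat : Nat) : Int) := by omega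
      have hs := swFF_spec text sep k.toNat (by omega) (by rwa [← hk'])
      rw [← hk'] at hs
      exact Or.inr ⟨by omega, hs.2.1, hs.2.2.1⟩
  · exact Or.inl (swFF_past text sep k (by omega))

theorem swMu_ff_succ (text sep : String) (i : Int) (h0 : 0 ≤ i) :
    swMu text (swFF text sep (i+1)) ≤ swN text := by
  rcases swFF_ge text sep (i+1) (by omega) with h | h
  · simp [swMu, h]
  · have hne : swFF text sep (i+1) ≠ -1 := by omega
    simp only [swMu, hne, if_false]
    omega

theorem swMu_pos (text : String) (i : Int) (hi : i ≠ -1) (h2 : i ≤ (swN text : Int)) :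
    1 ≤ swMu text i := by
  simp only [swMu, hi, if_false]
  omega

theorem swMu_le (text : String) (i : Int) : swMu text i ≤ swN text + 1 := by
  simp only [swMu]; split_ifs <;> omega

theorem swMu_step (text sep : String) (i : Int) (hi : i ≠ -1) (h1 : 0 ≤ i)
    (h2 : i ≤ (swN text : Int)) :
    swMu text (swFF text sep (i+1)) + 1 ≤ swMu text i := by
  rcases swFF_ge text sep (i+1) (by omega) with h | h
  · have hz : swMu text (swFF text sep (i+1)) = 0 := by rw [h]; simp [swMu]
    have := swMu_pos text i hi h2
    omega
  · have hne : swFF text sep (i+1) ≠ -1 := by omega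
    simp only [swMu, hne, if_false, hi]
    have h5 : ((swFF text sep (i+1)).toNat : Int) = swFF text sep (i+1) :=
      Int.toNat_of_nonneg (by omega)
    have h6 : ((i.toNat : Nat) : Int) = i := Int.toNat_of_nonneg h1
    omega

-- uniqueness: the leftmost occurrence at or after k is also leftmost after any k' ≤ it
theorem swFF_unique (text sep : String) (k k' : Nat) (hk : k ≤ swN text) (hkk : k ≤ k')
    (h : swFF text sep (k : Int) ≠ -1) (hk' : (k' : Int) ≤ swFF text sep (k : Int)) :
    swFF text sep (k' : Int) = swFF text sep (k : Int) := by
  obtain ⟨h1, h2, h3, h4⟩ := swFF_spec text sep k hk h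
  have hk'n : k' ≤ swN text := by omega
  have hocc : swOcc text sep (swFF text sep (k:Int)).toNat := h3
  have hne' : swFF text sep (k' : Int) ≠ -1 := by
    intro hc
    exact (swFF_neg_iff text sep k' hk'n).1 hc (swFF text sep (k:Int)).toNat (by omega) hocc
  obtain ⟨g1, g2, g3, g4⟩ := swFF_spec text sep k' hk'n hne'
  have hq : (swFF text sep (k':Int)).toNat = (swFF text sep (k:Int)).toNat := by
    by_contra hne
    rcases Nat.lt_or_ge (swFF text sep (k':Int)).toNat (swFF text sep (k:Int)).toNat with hlt | hge
    · exact h4 (swFF text sep (k':Int)).toNat (by omega) hlt g3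
    · exact g4 (swFF text sep (k:Int)).toNat (by omega) (by omega) h3
  omega

theorem swFk_neg_one (text sep : String) (ign : List Int) (f : Nat) :
    swFk text sep ign f (-1) = -1 := by
  cases f <;> simp [swFk]

theorem fnuLoop_succ (text pattern : String) (ignores : List Int) (start next_match : Int) (f : Nat) :
    fnuLoop text pattern ignores start next_match (f+1) =
      if next_match = -1 then -1
      else if next_match ∉ ignores then next_match
      else fnuLoop text pattern ignores (PySem.Str.findFrom text pattern (start+1))
             (PySem.Str.findFrom text pattern (start+1)) f := rfl

theorem swFk_succ (text sep : String) (ign : List Int) (f : Nat) (i : Int) :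
    swFk text sep ign (f+1) i =
      if i = -1 then -1
      else if i ∉ ign then i
      else swFk text sep ign f (swFF text sep (i+1)) := rfl

theorem swChain_succ (text sep : String) (f : Nat) (i : Int) :
    swChain text sep (f+1) i =
      if i = -1 then [] else i :: swChain text sep f (swFF text sep (i+1)) := rfl

-- A's inner loop in the self-similar state (start = next_match) IS swFk
theorem fnuLoop_eq_swFk (text sep : String) (ign : List Int) (f : Nat) :
    ∀ q : Int, fnuLoop text sep ign q q f = swFk text sep ign f q := by
  induction f with
  | zero => intro q; rfl
  | succ f ih =>
    intro q
    simp only [fnuLoop, swFk, swFF]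
    split_ifs <;> first | rfl | exact ih _

-- fuel independence of swFk above the measure
theorem swFk_fuel (text sep : String) (ign : List Int) :
    ∀ d f g i, swInv text sep i → swMu text i ≤ d → swMu text i ≤ f → swMu text i ≤ g →
      swFk text sep ign f i = swFk text sep ign g i := by
  intro d
  induction d with
  | zero =>
    intro f g i hInv hd _ _
    have : i = -1 := by
      rcases hInv with h | ⟨h1, h2, _⟩
      · exact h
      · exfalso; simp only [swMu] at hd; split_ifs at hd with h; omega; omega
    subst this; rw [swFk_neg_one, swFk_neg_one]
  | succ d ih =>
    intro f g i hInv hd hf hg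
    by_cases hi : i = -1
    · subst hi; rw [swFk_neg_one, swFk_neg_one]
    · rcases hInv with h | ⟨h1, h2, h3⟩
      · exact absurd h hi
      have hmu1 : 1 ≤ swMu text i := swMu_pos text i hi h2
      have hInv' : swInv text sep (swFF text sep (i+1)) := swInv_ff text sep (i+1) (by omega)
      have hmu' : swMu text (swFF text sep (i+1)) + 1 ≤ swMu text i := swMu_step text sep i hi h1 h2
      obtain ⟨f', rfl⟩ : ∃ f', f = f' + 1 := ⟨f - 1, by omega⟩
      obtain ⟨g', rfl⟩ : ∃ g', g = g' + 1 := ⟨g - 1, by omega⟩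
      simp only [swFk, hi, if_false]
      split_ifs <;> first | rfl | exact ih f' g' _ hInv' (by omega) (by omega) (by omega)

-- characterization of find_next_unignored
theorem fnu_eq_swFk (text sep : String) (ign : List Int) (loc : Int)
    (h0 : 0 ≤ loc) (h1 : loc ≤ (swN text : Int) + 1) :
    find_next_unignored text loc sep ign =
      swFk text sep ign (swN text + 2) (swFF text sep loc) := by
  have hN : text.toList.length = swN text := rfl
  unfold find_next_unignored
  rw [hN, show swN text + 2 = (swN text + 1) + 1 from rfl, fnuLoop_succ, swFk_succ]
  rw [show PySem.Str.findFrom text sep loc = swFF text sep loc from rfl,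
    show PySem.Str.findFrom text sep (loc+1) = swFF text sep (loc+1) from rfl]
  set p := swFF text sep loc with hp
  by_cases hpe : p = -1
  · rw [if_pos hpe, if_pos hpe]
  rw [if_neg hpe, if_neg hpe]
  by_cases hmem : p ∉ ign
  · rw [if_pos hmem, if_pos hmem]
  rw [if_neg hmem, if_neg hmem]
  rw [fnuLoop_eq_swFk]
  have hInvp : swInv text sep p := swInv_ff text sep loc h0
  rcases hInvp with h | ⟨hp0, hpn, hpocc⟩
  · exact absurd h hpe
  have hple : loc ≤ p := by
    rcases swFF_ge text sep loc h0 with h | h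
    · exact absurd h hpe
    · exact h
  have hInv' : swInv text sep (swFF text sep (p+1)) := swInv_ff text sep (p+1) (by omega)
  have hmu' : swMu text (swFF text sep (p+1)) ≤ swN text := swMu_ff_succ text sep p hp0
  by_cases hle : loc = p
  · rw [hle]
  · -- loc < p: the leftmost occurrence at or after loc+1 is still p
    have hlt : loc < p := by omega
    have hloc1 : (loc + 1) = (((loc+1).toNat : Nat) : Int) := by omega
    have hloc' : loc = ((loc.toNat : Nat) : Int) := by omega
    have hffp : swFF text sep (loc+1) = p := by
      have hu := swFF_unique text sep loc.toNat (loc+1).toNat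
        (by omega) (by omega)
        (by rw [← hloc']; exact hpe)
        (by rw [← hloc', ← hp]; omega)
      rw [← hloc1] at hu
      rw [hu, ← hloc', ← hp]
    rw [hffp]
    rw [show swN text + 1 = swN text + 1 from rfl, swFk_succ, if_neg hpe, if_neg hmem]
    exact swFk_fuel text sep ign (swN text + 1) _ _ _ hInv' (by omega) (by omega) (by omega)

-- B's position loop IS swChain
theorem posLoop_eq_swChain (text sep : String) (f : Nat) :
    ∀ i : Int, posLoop text sep i f = swChain text sep f i := by
  induction f with
  | zero => intro i; rfl
  | succ f ih => intro i; simp only [posLoop, swChain, swFF]; split_ifs <;> simp [ih]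

theorem swChain_neg_one (text sep : String) (f : Nat) : swChain text sep f (-1) = [] := by
  cases f <;> simp [swChain]

-- fuel independence of swChain above the measure
theorem swChain_fuel (text sep : String) :
    ∀ d f g i, swInv text sep i → swMu text i ≤ d → swMu text i ≤ f → swMu text i ≤ g →
      swChain text sep f i = swChain text sep g i := by
  intro d
  induction d with
  | zero =>
    intro f g i hInv hd _ _
    have : i = -1 := by
      rcases hInv with h | ⟨h1, h2, _⟩
      · exact h
      · exfalso; simp only [swMu] at hd; split_ifs at hd with h; omega; omega
    subst this; rw [swChain_neg_one, swChain_neg_one]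
  | succ d ih =>
    intro f g i hInv hd hf hg
    by_cases hi : i = -1
    · subst hi; rw [swChain_neg_one, swChain_neg_one]
    · rcases hInv with h | ⟨h1, h2, h3⟩
      · exact absurd h hi
      have hmu1 : 1 ≤ swMu text i := swMu_pos text i hi h2
      have hInv' : swInv text sep (swFF text sep (i+1)) := swInv_ff text sep (i+1) (by omega)
      have hmu' : swMu text (swFF text sep (i+1)) + 1 ≤ swMu text i := swMu_step text sep i hi h1 h2
      obtain ⟨f', rfl⟩ : ∃ f', f = f' + 1 := ⟨f - 1, by omega⟩
      obtain ⟨g', rfl⟩ : ∃ g', g = g' + 1 := ⟨g - 1, by omega⟩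
      simp only [swChain, hi, if_false]
      rw [ih f' g' _ hInv' (by omega) (by omega) (by omega)]

-- properties of swFk's result: -1, or a non-ignored index between i and n
theorem swFk_mem (text sep : String) (ign : List Int) :
    ∀ d i, swInv text sep i → swMu text i ≤ d →
      swFk text sep ign (swN text + 2) i = -1 ∨
        (i ≤ swFk text sep ign (swN text + 2) i ∧ 0 ≤ i ∧
         swFk text sep ign (swN text + 2) i ≤ (swN text : Int) ∧
         swFk text sep ign (swN text + 2) i ∉ ign) := by
  intro d
  induction d with
  | zero =>
    intro i hInv hd
    have : i = -1 := by
      rcases hInv with h | ⟨h1, h2, _⟩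
      · exact h
      · exfalso; simp only [swMu] at hd; split_ifs at hd with h; omega; omega
    subst this; rw [swFk_neg_one]; exact Or.inl rfl
  | succ d ih =>
    intro i hInv hd
    by_cases hi : i = -1
    · subst hi; rw [swFk_neg_one]; exact Or.inl rfl
    · rcases hInv with h | ⟨h1, h2, h3⟩
      · exact absurd h hi
      have hunf : swFk text sep ign (swN text + 2) i =
          if i ∉ ign then i else swFk text sep ign (swN text + 1) (swFF text sep (i+1)) := by
        conv_lhs => rw [show swN text + 2 = (swN text + 1) + 1 from rfl, swFk_succ]
        rw [if_neg hi]
      by_cases hmem : i ∉ ign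
      · rw [hunf, if_pos hmem]; exact Or.inr ⟨le_refl _, h1, h2, hmem⟩
      · rw [hunf, if_neg hmem]
        have hInv' : swInv text sep (swFF text sep (i+1)) := swInv_ff text sep (i+1) (by omega)
        have hmu1 : 1 ≤ swMu text i := swMu_pos text i hi h2
        have hmu' : swMu text (swFF text sep (i+1)) + 1 ≤ swMu text i := swMu_step text sep i hi h1 h2
        have hub : swMu text i ≤ swN text + 1 := swMu_le text i
        have hfe : swFk text sep ign (swN text + 1) (swFF text sep (i+1)) =
            swFk text sep ign (swN text + 2) (swFF text sep (i+1)) :=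
          swFk_fuel text sep ign (swN text + 2) _ _ _ hInv' (by omega) (by omega) (by omega)
        rw [hfe]
        rcases ih (swFF text sep (i+1)) hInv' (by omega) with h | ⟨g1, g2, g3, g4⟩
        · exact Or.inl h
        · have : i ≤ swFF text sep (i+1) := by
            rcases swFF_ge text sep (i+1) (by omega) with h' | h'
            · rw [h'] at g2; omega
            · omega
          exact Or.inr ⟨by omega, h1, g3, g4⟩

-- the fold over the occurrence stream, advanced to the first non-ignored index
theorem fold_chain (text sep : String) (ign : List Int) :
    ∀ d i st, swInv text sep i → swMu text i ≤ d →
      List.foldl (bStep text ign) st (swChain text sep (swN text + 2) i) =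
        (if swFk text sep ign (swN text + 2) i = -1 then st
         else List.foldl (bStep text ign)
                (bStep text ign st (swFk text sep ign (swN text + 2) i))
                (swChain text sep (swN text + 2)
                  (swFF text sep (swFk text sep ign (swN text + 2) i + 1)))) := by
  intro d
  induction d with
  | zero =>
    intro i st hInv hd
    have : i = -1 := by
      rcases hInv with h | ⟨h1, h2, _⟩
      · exact h
      · exfalso; simp only [swMu] at hd; split_ifs at hd with h; omega; omega
    subst this; rw [swChain_neg_one]
    simp [swFk_neg_one]
  | succ d ih =>
    intro i st hInv hd
    by_cases hi : i = -1
    · subst hi; rw [swChain_neg_one]; simp [swFk_neg_one]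
    · rcases hInv with h | ⟨h1, h2, h3⟩
      · exact absurd h hi
      have hmu1 : 1 ≤ swMu text i := swMu_pos text i hi h2
      have hInv' : swInv text sep (swFF text sep (i+1)) := swInv_ff text sep (i+1) (by omega)
      have hmu' : swMu text (swFF text sep (i+1)) + 1 ≤ swMu text i := swMu_step text sep i hi h1 h2
      have hub : swMu text i ≤ swN text + 1 := swMu_le text i
      have hchain : swChain text sep (swN text + 2) i =
          i :: swChain text sep (swN text + 2) (swFF text sep (i+1)) := by
        have hcf : swChain text sep (swN text + 1) (swFF text sep (i+1)) =
            swChain text sep (swN text + 2) (swFF text sep (i+1)) :=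
          swChain_fuel text sep (swN text + 2) _ _ _ hInv' (by omega) (by omega) (by omega)
        conv_lhs => rw [show swN text + 2 = (swN text + 1) + 1 from rfl, swChain_succ]
        rw [if_neg hi, hcf]
      have hfk : swFk text sep ign (swN text + 2) i =
          if i ∉ ign then i else swFk text sep ign (swN text + 2) (swFF text sep (i+1)) := by
        have hfe : swFk text sep ign (swN text + 1) (swFF text sep (i+1)) =
            swFk text sep ign (swN text + 2) (swFF text sep (i+1)) :=
          swFk_fuel text sep ign (swN text + 2) _ _ _ hInv' (by omega) (by omega) (by omega)
        conv_lhs => rw [show swN text + 2 = (swN text + 1) + 1 from rfl, swFk_succ]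
        rw [if_neg hi, hfe]
      rw [hchain]
      by_cases hmem : i ∉ ign
      · rw [hfk, if_pos hmem]
        rw [if_neg (by exact hi)]
        simp only [List.foldl_cons]
      · rw [hfk, if_neg hmem]
        simp only [List.foldl_cons]
        have hstep : bStep text ign st i = st := by simp [bStep, hmem]
        rw [hstep]
        exact ih (swFF text sep (i+1)) st hInv' (by omega)

-- the main loop correspondence: A's outer loop equals the fold over the occurrence stream
theorem main_loop (text sep : String) (ign : List Int) :
    ∀ d (loc : Int) acc f, 0 ≤ loc → loc ≤ (swN text : Int) + 1 →
      swN text + 2 - loc.toNat ≤ f → swN text + 2 - loc.toNat ≤ d →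
      aLoop text sep ign loc acc f =
        (let st := List.foldl (bStep text ign) (loc, acc) (swChain text sep (swN text + 2) (swFF text sep loc));
         st.2 ++ [PySem.Str.slice text (some st.1) none]) := by
  intro d
  induction d with
  | zero => intro loc acc f h0 h1 hf hd; exfalso; omega
  | succ d ih =>
    intro loc acc f h0 h1 hf hd
    obtain ⟨f', rfl⟩ : ∃ f', f = f' + 1 := ⟨f - 1, by omega⟩
    simp only [aLoop]
    rw [fnu_eq_swFk text sep ign loc h0 h1]
    have hInvff : swInv text sep (swFF text sep loc) := swInv_ff text sep loc h0
    have hmuff : swMu text (swFF text sep loc) ≤ swN text + 1 := by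
      simp only [swMu]; split_ifs with h; omega; omega
    have hfold := fold_chain text sep ign (swN text + 1) (swFF text sep loc)
      (loc, acc) hInvff (by omega)
    rcases swFk_mem text sep ign (swN text + 1) (swFF text sep loc) hInvff (by omega)
      with hfk | ⟨g1, g2, g3, g4⟩
    · rw [hfk]
      norm_num
      rw [hfold, if_pos hfk]
      exact ⟨rfl, rfl⟩
    · set P := swFk text sep ign (swN text + 2) (swFF text sep loc) with hP
      have hlocP : loc ≤ P := by
        rcases swFF_ge text sep loc h0 with h | h
        · rw [h] at g2; omega
        · omega
      have hPpos : ¬ P < 0 := by omega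
      rw [if_neg hPpos]
      rw [hfold, if_neg (by omega)]
      have hstep : bStep text ign (loc, acc) P =
          (P + 1, acc ++ [PySem.Str.slice text (some loc) (some P)]) := by
        simp [bStep, g4]
      rw [hstep]
      have := ih (P + 1) (acc ++ [PySem.Str.slice text (some loc) (some P)]) f'
        (by omega) (by omega) (by omega) (by omega)
      rw [this]

-- ===== VERDICT (by name: the statement is the Claim_ definition above) =====
theorem split_with_ignores_spec : Claim_equal_split_with_ignores := by
  intro text sep ign _
  unfold Spec_split_with_ignores split_with_ignores split_with_ignores_alt
  rw [posLoop_eq_swChain]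
  have hfind : PySem.Str.find text sep = swFF text sep 0 := by
    simp [swFF, PySem.Str.findFrom_eq, PySem.Str.find_eq, PySem.Chars.findFrom_zero]
  rw [hfind]
  have hN : text.toList.length = swN text := rfl
  rw [hN]
  exact main_loop text sep ign (swN text + 2) 0 [] (swN text + 2)
    (by omega) (by omega) (by omega) (by omega)
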